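-- pv_equiv track=rewrite | github.com/dilaksdigit/CIE_new | backend/python/src/title/validation.py | _extract_primary_benefit
-- ===== SOURCE A (Python) =====
-- def _extract_primary_benefit(intent_statement: str | None) -> str:
--     """Extract a short benefit phrase from cluster intent statement (e.g. first clause)."""
--     if not intent_statement or not intent_statement.strip():
--         return "Quality and Value"
--     s = intent_statement.strip()
--     for sep in ("—", "-", ".", ","):
--         if sep in s:
--             s = s.split(sep)[0].strip()
--     return s[:60] if len(s) > 60 else s
-- ===== SOURCE B (Python) =====
-- def _extract_primary_benefit(intent_statement):
--     """Extract a short benefit phrase from cluster intent statement (e.g. first clause)."""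
--     if not intent_statement or not intent_statement.strip():
--         return "Quality and Value"
--     s = intent_statement.strip()
--     cut = next((i for i, ch in enumerate(s) if ch in "\u2014-.,"), len(s))
--     return s[:cut].strip()[:60]
-- ===== Notes on version B (the rewrite author's own statement) =====
-- stated objective: simpler
-- what changed: A's four sequential split(sep)[0].strip() reassignments (one split pass per separator) are replaced by a single left-to-right scan for the earliest separator position followed by one slice and one strip.
import Mathlib
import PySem

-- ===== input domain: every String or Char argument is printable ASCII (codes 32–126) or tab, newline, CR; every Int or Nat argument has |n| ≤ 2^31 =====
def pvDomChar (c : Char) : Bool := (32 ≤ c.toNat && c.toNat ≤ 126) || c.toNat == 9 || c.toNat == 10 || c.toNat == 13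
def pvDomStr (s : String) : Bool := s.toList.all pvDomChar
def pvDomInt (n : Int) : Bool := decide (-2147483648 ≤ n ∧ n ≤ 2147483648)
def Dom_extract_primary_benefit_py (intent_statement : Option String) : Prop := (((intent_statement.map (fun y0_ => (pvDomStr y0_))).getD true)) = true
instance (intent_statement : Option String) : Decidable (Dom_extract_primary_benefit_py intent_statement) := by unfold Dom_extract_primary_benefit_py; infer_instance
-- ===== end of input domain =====

-- B replaces A's four sequential split/strip reassignments by one scan for the earliest
-- separator position, a single slice and one strip (objective: simpler decomposition).

-- ===== PORT A =====
-- 'if sep in s: s = s.split(sep)[0].strip()'  (str.split always yields at least one piece, so [0] is headI)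
def pvStepA (s : List Char) (sep : List Char) : List Char :=
  if PySem.Chars.isIn sep s then PySem.Chars.strip (PySem.Chars.splitOn s sep).headI else s

def extract_primary_benefit_py (intent_statement : Option String) : String :=
  match intent_statement with
  | none => "Quality and Value"
  | some t =>
    -- 'if not intent_statement or not intent_statement.strip()'
    if t.toList = [] ∨ PySem.Chars.strip t.toList = [] then "Quality and Value"
    else
      let s := PySem.Chars.strip t.toList
      -- 'for sep in ("—", "-", ".", ","): …'
      let s' := [['—'], ['-'], ['.'], [',']].foldl pvStepA s
      -- 'return s[:60] if len(s) > 60 else s'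
      if 60 < s'.length then String.ofList (s'.take 60) else String.ofList s'

-- ===== PORT B =====
def extract_primary_benefit_py_alt (intent_statement : Option String) : String :=
  match intent_statement with
  | none => "Quality and Value"
  | some t =>
    if t.toList = [] ∨ PySem.Chars.strip t.toList = [] then "Quality and Value"
    else
      let s := PySem.Chars.strip t.toList
      -- 'cut = next((i for i, ch in enumerate(s) if ch in "—-.,"), len(s))'
      let cut := s.findIdx (fun ch => ch ∈ ['—', '-', '.', ','])
      -- 'return s[:cut].strip()[:60]'  (0 ≤ cut ≤ len(s), so the slices are List.take)
      String.ofList ((PySem.Chars.strip (s.take cut)).take 60)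

-- ===== PRECONDITION & SPEC =====
def Spec_extract_primary_benefit_py (intent_statement : Option String) (out : String) : Prop := out = extract_primary_benefit_py_alt intent_statement
instance (intent_statement : Option String) (out : String) : Decidable (Spec_extract_primary_benefit_py intent_statement out) := by unfold Spec_extract_primary_benefit_py; infer_instance

-- ===== CLAIM (what is proved, stated in full; the proofs are below) =====
def Claim_equal_extract_primary_benefit_py : Prop := ∀ (intent_statement : Option String), Dom_extract_primary_benefit_py intent_statement → Spec_extract_primary_benefit_py intent_statement (extract_primary_benefit_py intent_statement)

-- ===== LEMMAS AND PROOFS =====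

-- 'c in s' for a one-character separator is list membership
theorem pv_isIn_singleton (c : Char) (s : List Char) :
    PySem.Chars.isIn [c] s = true ↔ c ∈ s := by
  rw [PySem.Chars.isIn_iff_infix]
  constructor
  · intro h; exact h.subset (List.mem_singleton_self c)
  · intro h
    obtain ⟨p, q, rfl⟩ := List.append_of_mem h
    exact ⟨p, q, by simp⟩

-- s.split(c)[0] is the prefix of s before the first c
theorem pv_splitOn_go_head (c : Char) :
    ∀ (fuel : Nat) (l cur : List Char) (acc : List (List Char)), l.length ≤ fuel →
      ∃ rest, PySem.Chars.splitOn.go [c] fuel l cur acc =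
        acc.reverse ++ (cur.reverse ++ l.takeWhile (fun ch => ch != c)) :: rest := by
  intro fuel
  induction fuel with
  | zero =>
    intro l cur acc h
    have : l = [] := List.eq_nil_of_length_eq_zero (Nat.le_zero.mp h)
    subst this
    exact ⟨[], by simp [PySem.Chars.splitOn.go]⟩
  | succ fuel ih =>
    intro l cur acc h
    cases l with
    | nil => exact ⟨[], by simp [PySem.Chars.splitOn.go]⟩
    | cons ch rest =>
      by_cases hc : ch = c
      · subst hc
        obtain ⟨r, hr⟩ := ih rest [] (cur.reverse :: acc) (by simpa using Nat.le_of_succ_le_succ h)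
        refine ⟨rest.takeWhile (fun x => x != ch) :: r, ?_⟩
        simp only [PySem.Chars.splitOn.go, List.isPrefixOf]
        rw [if_pos (by simp)]
        rw [show List.drop [ch].length (ch :: rest) = rest by simp]
        rw [hr]
        simp
      · obtain ⟨r, hr⟩ := ih rest (ch :: cur) acc (by simpa using Nat.le_of_succ_le_succ h)
        refine ⟨r, ?_⟩
        simp only [PySem.Chars.splitOn.go]
        rw [if_neg (by simp; exact fun h => hc h.symm)]
        rw [hr]
        simp [hc]

theorem pv_splitOn_head (c : Char) (s : List Char) :
    (PySem.Chars.splitOn s [c]).headI = s.takeWhile (fun ch => ch != c) := by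
  obtain ⟨rest, h⟩ := pv_splitOn_go_head c (s.length + 1) s [] [] (by omega)
  unfold PySem.Chars.splitOn
  rw [h]; simp

-- lstrip commutes with takeWhile p when p holds on whitespace
theorem pv_lstrip_takeWhile (p : Char → Bool)
    (hp : ∀ ch, PySem.Chars.isspace ch = true → p ch = true) (l : List Char) :
    PySem.Chars.lstrip (l.takeWhile p) = (PySem.Chars.lstrip l).takeWhile p := by
  induction l with
  | nil => rfl
  | cons ch t ih =>
    by_cases hs : PySem.Chars.isspace ch = true
    · simp [PySem.Chars.lstrip, hp ch hs, hs] at *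
      exact ih
    · by_cases hpc : p ch = true
      · simp [PySem.Chars.lstrip, hpc, hs]
      · simp [PySem.Chars.lstrip, hpc, hs]

-- dropping an all-whitespace suffix does not change rstrip
theorem pv_rstrip_append_ws (x w : List Char)
    (hw : ∀ ch ∈ w, PySem.Chars.isspace ch = true) :
    PySem.Chars.rstrip (x ++ w) = PySem.Chars.rstrip x := by
  have hnil : List.dropWhile PySem.Chars.isspace w.reverse = [] :=
    List.dropWhile_eq_nil_iff.mpr (fun a ha => hw a (by simpa using ha))
  simp [PySem.Chars.rstrip, List.dropWhile_append, hnil]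

-- l splits as rstrip l ++ trailing whitespace
theorem pv_rstrip_decomp (l : List Char) :
    ∃ w, l = PySem.Chars.rstrip l ++ w ∧ ∀ ch ∈ w, PySem.Chars.isspace ch = true := by
  refine ⟨(l.reverse.takeWhile PySem.Chars.isspace).reverse, ?_, ?_⟩
  · simp only [PySem.Chars.rstrip]
    rw [← List.reverse_append, List.takeWhile_append_dropWhile, List.reverse_reverse]
  · intro ch hch
    exact List.mem_takeWhile_imp (by simpa using hch)

theorem pv_rstrip_takeWhile (p : Char → Bool)
    (hp : ∀ ch, PySem.Chars.isspace ch = true → p ch = true) (l : List Char) :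
    PySem.Chars.rstrip ((PySem.Chars.rstrip l).takeWhile p) =
      PySem.Chars.rstrip (l.takeWhile p) := by
  obtain ⟨w, hdec, hw⟩ := pv_rstrip_decomp l
  have hwp : w.takeWhile p = w :=
    List.takeWhile_eq_self_iff.mpr (fun a ha => hp a (hw a ha))
  conv_rhs => rw [hdec]
  rw [List.takeWhile_append]
  split_ifs with h
  · have hfull : (PySem.Chars.rstrip l).takeWhile p = PySem.Chars.rstrip l :=
      (List.takeWhile_prefix p).eq_of_length h
    rw [hfull, hwp, pv_rstrip_append_ws _ _ hw]
  · rfl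

theorem pv_lstrip_rstrip (l : List Char) :
    PySem.Chars.lstrip (PySem.Chars.rstrip l) = PySem.Chars.rstrip (PySem.Chars.lstrip l) := by
  induction l with
  | nil => rfl
  | cons c t ih =>
    by_cases ht : List.dropWhile PySem.Chars.isspace t.reverse = []
    · have htw : ∀ ch ∈ t, PySem.Chars.isspace ch = true := by
        intro ch hch
        exact List.dropWhile_eq_nil_iff.mp ht ch (by simpa using hch)
      by_cases hs : PySem.Chars.isspace c = true
      · have h1 : PySem.Chars.rstrip (c :: t) = [] := by
          simp [PySem.Chars.rstrip, List.dropWhile_append, ht, hs]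
        have h2 : PySem.Chars.lstrip (c :: t) = [] := by
          simp only [PySem.Chars.lstrip]
          exact List.dropWhile_eq_nil_iff.mpr (by
            intro a ha
            rcases List.mem_cons.mp ha with h | h
            · exact h ▸ hs
            · exact htw a h)
        rw [h1, h2]; rfl
      · have h1 : PySem.Chars.rstrip (c :: t) = [c] := by
          simp [PySem.Chars.rstrip, List.dropWhile_append, ht, hs]
        have h2 : PySem.Chars.lstrip (c :: t) = c :: t := by
          simp [PySem.Chars.lstrip, hs]
        rw [h1, h2]
        have h3 : PySem.Chars.rstrip (c :: t) = [c] := h1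
        rw [show PySem.Chars.lstrip [c] = [c] by simp [PySem.Chars.lstrip, hs]]
        exact h3.symm
    · have h1 : PySem.Chars.rstrip (c :: t) = c :: PySem.Chars.rstrip t := by
        simp [PySem.Chars.rstrip, List.dropWhile_append, ht]
      by_cases hs : PySem.Chars.isspace c = true
      · rw [h1]
        have h2 : PySem.Chars.lstrip (c :: PySem.Chars.rstrip t) =
            PySem.Chars.lstrip (PySem.Chars.rstrip t) := by
          simp [PySem.Chars.lstrip, hs]
        have h3 : PySem.Chars.lstrip (c :: t) = PySem.Chars.lstrip t := by
          simp [PySem.Chars.lstrip, hs]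
        rw [h2, h3, ih]
      · rw [h1]
        have h2 : PySem.Chars.lstrip (c :: PySem.Chars.rstrip t) =
            c :: PySem.Chars.rstrip t := by
          simp [PySem.Chars.lstrip, hs]
        have h3 : PySem.Chars.lstrip (c :: t) = c :: t := by
          simp [PySem.Chars.lstrip, hs]
        rw [h2, h3, h1]

-- the middle strip of A's loop is harmless
theorem pv_strip_takeWhile_strip (p : Char → Bool)
    (hp : ∀ ch, PySem.Chars.isspace ch = true → p ch = true) (l : List Char) :
    PySem.Chars.strip ((PySem.Chars.strip l).takeWhile p) =
      PySem.Chars.strip (l.takeWhile p) := by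
  simp only [PySem.Chars.strip]
  rw [pv_lstrip_takeWhile p hp, pv_lstrip_rstrip,
    show PySem.Chars.lstrip (PySem.Chars.lstrip l) = PySem.Chars.lstrip l from
      List.dropWhile_idempotent _ _,
    pv_rstrip_takeWhile p hp, ← pv_lstrip_takeWhile p hp]

-- a non-whitespace character survives strip
theorem pv_mem_strip (c : Char) (hc : PySem.Chars.isspace c = false) (l : List Char) :
    c ∈ PySem.Chars.strip l ↔ c ∈ l := by
  constructor
  · intro h
    simp only [PySem.Chars.strip, PySem.Chars.rstrip, PySem.Chars.lstrip,
      List.mem_reverse] at h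
    have h1 := (List.dropWhile_sublist (p := PySem.Chars.isspace)
      (l := (List.dropWhile PySem.Chars.isspace l).reverse)).subset h
    rw [List.mem_reverse] at h1
    exact (List.dropWhile_sublist _).subset h1
  · intro h
    have h1 : c ∈ PySem.Chars.lstrip l := by
      rcases List.mem_append.mp
        ((List.takeWhile_append_dropWhile (p := PySem.Chars.isspace) (l := l)) ▸ h) with h2 | h2
      · exact absurd (List.mem_takeWhile_imp h2) (by simp [hc])
      · exact h2
    obtain ⟨w, hdec, hw⟩ := pv_rstrip_decomp (PySem.Chars.lstrip l)
    rcases List.mem_append.mp (hdec ▸ h1) with h2 | h2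
    · exact h2
    · exact absurd (hw c h2) (by simp [hc])

-- A's sequential cut loop computes the prefix before the earliest separator
theorem pv_takeWhile_congr_mem {p q : Char → Bool} :
    ∀ (l : List Char), (∀ x ∈ l, p x = q x) → l.takeWhile p = l.takeWhile q := by
  intro l
  induction l with
  | nil => intro _; rfl
  | cons a t ih =>
    intro h
    rw [List.takeWhile_cons, List.takeWhile_cons, h a (List.mem_cons_self)]
    by_cases hq : q a = true
    · simp [hq, ih (fun x hx => h x (List.mem_cons_of_mem _ hx))]
    · simp [hq]

theorem pv_loop (cs : List Char) (hcs : ∀ c ∈ cs, PySem.Chars.isspace c = false) :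
    ∀ l : List Char, (cs.map (fun c => [c])).foldl pvStepA (PySem.Chars.strip l) =
      PySem.Chars.strip (l.takeWhile (fun ch => !cs.contains ch)) := by
  induction cs with
  | nil =>
    intro l
    rw [List.map_nil, List.foldl_nil,
      List.takeWhile_eq_self_iff.mpr (by intro a _; simp)]
  | cons c cs' ih =>
    intro l
    have hc : PySem.Chars.isspace c = false := hcs c List.mem_cons_self
    have hcs' : ∀ x ∈ cs', PySem.Chars.isspace x = false :=
      fun x hx => hcs x (List.mem_cons_of_mem _ hx)
    rw [List.map_cons, List.foldl_cons]
    by_cases hm : c ∈ l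
    · have h1 : PySem.Chars.isIn [c] (PySem.Chars.strip l) = true :=
        (pv_isIn_singleton c _).mpr ((pv_mem_strip c hc l).mpr hm)
      have hnws : ∀ ch, PySem.Chars.isspace ch = true → (ch != c) = true := by
        intro ch hws
        simp only [bne_iff_ne, ne_eq]
        intro hEq
        rw [hEq] at hws
        rw [hws] at hc
        cases hc
      have hstep : pvStepA (PySem.Chars.strip l) [c]
          = PySem.Chars.strip (l.takeWhile (fun ch => ch != c)) := by
        rw [pvStepA, if_pos h1, pv_splitOn_head]
        exact pv_strip_takeWhile_strip _ hnws l
      rw [hstep, ih hcs' (l.takeWhile (fun ch => ch != c)), List.takeWhile_takeWhile]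
      congr 1
      apply pv_takeWhile_congr_mem
      intro x _
      by_cases hxc : x = c <;> by_cases hxm : x ∈ cs' <;>
        simp [hxc, hxm, bne]
    · have h1 : PySem.Chars.isIn [c] (PySem.Chars.strip l) = false := by
        rw [Bool.eq_false_iff]
        intro h
        exact hm ((pv_mem_strip c hc l).mp ((pv_isIn_singleton c _).mp h))
      have hstep : pvStepA (PySem.Chars.strip l) [c] = PySem.Chars.strip l := by
        rw [pvStepA, if_neg (by rw [h1]; exact Bool.false_ne_true)]
      rw [hstep, ih hcs' l]
      congr 1
      apply pv_takeWhile_congr_mem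
      intro x hx
      have hxc : x ≠ c := fun h => hm (h ▸ hx)
      simp [hxc]


-- ===== VERDICT (by name: the statement is the Claim_ definition above) =====
theorem extract_primary_benefit_py_spec : Claim_equal_extract_primary_benefit_py := by
  intro intent _
  unfold Spec_extract_primary_benefit_py
  cases intent with
  | none => rfl
  | some t =>
    unfold extract_primary_benefit_py extract_primary_benefit_py_alt
    by_cases hguard : t.toList = [] ∨ PySem.Chars.strip t.toList = []
    · simp only [hguard, if_true]
    · simp only [hguard, if_false]
      have hsep_ws : ∀ c ∈ (['—', '-', '.', ','] : List Char),
          PySem.Chars.isspace c = false := by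
        intro c hc
        fin_cases hc <;> decide
      have hA : [['—'], ['-'], ['.'], [',']].foldl pvStepA (PySem.Chars.strip t.toList)
          = PySem.Chars.strip (t.toList.takeWhile
              (fun ch => !(['—', '-', '.', ','] : List Char).contains ch)) :=
        pv_loop ['—', '-', '.', ','] hsep_ws t.toList
      have hB : (PySem.Chars.strip t.toList).take
            ((PySem.Chars.strip t.toList).findIdx
              (fun ch => ch ∈ (['—', '-', '.', ','] : List Char)))
          = (PySem.Chars.strip t.toList).takeWhile
              (fun ch => !(['—', '-', '.', ','] : List Char).contains ch) := by
        rw [List.takeWhile_eq_take_findIdx_not]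
        have hpred : (fun a : Char => !!(['—', '-', '.', ','] : List Char).contains a)
            = (fun ch : Char => decide (ch ∈ (['—', '-', '.', ','] : List Char))) := by
          funext ch
          simp
        rw [hpred]
      have hmid : PySem.Chars.strip ((PySem.Chars.strip t.toList).takeWhile
            (fun ch => !(['—', '-', '.', ','] : List Char).contains ch))
          = PySem.Chars.strip (t.toList.takeWhile
            (fun ch => !(['—', '-', '.', ','] : List Char).contains ch)) := by
        apply pv_strip_takeWhile_strip
        intro ch hws
        have hns : ch ∉ (['—', '-', '.', ','] : List Char) := by
          intro hmem
          fin_cases hmem <;> simp_all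
        simp [hns]
      rw [hA, hB, hmid]
      split_ifs with hlen
      · rfl
      · rw [List.take_of_length_le (Nat.le_of_not_lt hlen)]
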